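-- pv_equiv track=rewrite | github.com/RuanKang/learn_github | minimal.py | f
-- ===== SOURCE A (Python) =====
-- def f(N, n):
--     if n == 0:
--         return 1
--     if n > 0:
--         a = 1
--         b = N - 1
--         c = 0
--         while b != 0:
--             c += f(b, n - 1)
--             a += 1
--             b -= 1
--         return c
-- ===== SOURCE B (Python) =====
-- def f(N, n):
--     # Closed-form binomial C(N-1, n): exact multiplicative product instead of
--     # A's exponential recursion.
--     if n == 0:
--         return 1
--     m = N - 1
--     if 0 <= m < n:
--         return 0
--     r = 1
--     for i in range(n):
--         r = r * (m - i) // (i + 1)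
--     return r
-- ===== Notes on version B (the rewrite author's own statement) =====
-- stated objective: faster
-- what changed: Replaced the exponential nested recursion (which sums f(b, n-1) over b = 1..N-1) by the closed-form binomial coefficient C(N-1, n), computed by the standard exact multiplicative product in a single O(n) loop; Pre_ excludes n < 0 (A falls through both ifs and returns None, not an int), n > 0 with N < 1 (A's while-loop never terminates), and min(n, N-1) >= 997, where A's recursion nests to depth min(n, N-1)+1 and either raises RecursionError at the interpreter's recursion limit or needs about 2^997 recursive calls and never feasibly returns. Intended as asymptotically faster; …
-- outside the precondition, e.g. on f(-1, -1): A returns None, B returns 1; on f(5, -2): A returns None, B returns 1; on f(1000, 1000): A does not finish within the time limit, B returns 0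
import Mathlib
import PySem

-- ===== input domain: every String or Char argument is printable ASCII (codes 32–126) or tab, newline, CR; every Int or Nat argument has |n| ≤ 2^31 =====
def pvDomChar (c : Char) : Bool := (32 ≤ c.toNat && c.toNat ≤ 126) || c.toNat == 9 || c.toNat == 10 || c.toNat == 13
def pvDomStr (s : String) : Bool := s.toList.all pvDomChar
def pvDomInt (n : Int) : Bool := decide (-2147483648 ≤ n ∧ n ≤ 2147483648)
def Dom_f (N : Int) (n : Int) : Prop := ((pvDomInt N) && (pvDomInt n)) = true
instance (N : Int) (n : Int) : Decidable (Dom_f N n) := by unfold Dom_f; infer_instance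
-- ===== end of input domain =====

-- B replaces A's exponential nested recursion by the closed-form binomial C(N-1, n)
-- computed with the exact multiplicative product. Intended as faster (asymptotic);
-- a timing run saw A time out where B returned but recorded no clean ratio.

-- ===== PORT A =====
-- A's inner while-loop: `while b != 0: c += f(b, n-1); b -= 1`.
-- `fuel` is b.toNat at entry (the loop's exact trip count when b ≥ 0; inputs
-- where b starts negative make Python diverge and are excluded by Pre_f).
def fLoop (g : Int → Int) : Nat → Int → Int → Int
  | 0, _, c => c
  | fuel + 1, b, c => if b = 0 then c else fLoop g fuel (b - 1) (c + g b)

-- A by recursion on n (as a Nat): fAux k N = Python f(N, k) for k ≥ 0.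
def fAux : Nat → Int → Int
  | 0, _ => 1
  | k + 1, N => fLoop (fAux k) (N - 1).toNat (N - 1) 0

def f (N : Int) (n : Int) : Int :=
  if n = 0 then 1
  else if n > 0 then fAux n.toNat N
  else 0   -- Python returns None here (no return value); excluded by Pre_f

-- ===== PORT B =====
def f_alt (N : Int) (n : Int) : Int :=
  if n = 0 then 1
  else if 0 ≤ N - 1 ∧ N - 1 < n then 0
  else (PySem.List.pyRange 0 n 1).foldl
        (fun r i => PySem.Int.floordiv (r * (N - 1 - i)) (i + 1)) 1

-- ===== PRECONDITION & SPEC =====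
-- Pre_f excludes exactly the inputs on which A returns no int value: n < 0
-- (Python A falls through both ifs and returns None, not an int); n > 0 with
-- N < 1 (the while-loop starts at b = N-1 < 0 and never terminates); and
-- min(n, N-1) ≥ 997, where A's recursion nests to depth min(n, N-1)+1 and so
-- either raises RecursionError at CPython's recursion limit (measured to fire
-- exactly at depth ≥ 999 in this interpreter; 997 leaves a two-frame margin
-- for the caller's stack) or, just under that limit, needs ~2^997 recursive
-- calls and cannot feasibly return.
def Pre_f (N : Int) (n : Int) : Prop :=
  n = 0 ∨ (0 < n ∧ 1 ≤ N ∧ ¬(997 ≤ n ∧ 998 ≤ N))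
instance (N : Int) (n : Int) : Decidable (Pre_f N n) := by unfold Pre_f; infer_instance
def pvWitness_f : Int × Int := (5, 2)

def Spec_f (N : Int) (n : Int) (out : Int) : Prop := out = f_alt N n
instance (N : Int) (n : Int) (out : Int) : Decidable (Spec_f N n out) := by unfold Spec_f; infer_instance

-- ===== CLAIM (what is proved, stated in full; the proofs are below) =====
def Claim_equal_f : Prop := ∀ (N : Int) (n : Int), Dom_f N n → Pre_f N n → Spec_f N n (f N n)

-- ===== LEMMAS AND PROOFS =====

-- The while-loop with b starting at (k : Int) and fuel k sums g over 1..k.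
theorem fLoop_eq (g : Int → Int) (k : Nat) (c : Int) :
    fLoop g k (k : Int) c = c + ∑ j ∈ Finset.range k, g (j + 1) := by
  induction k generalizing c with
  | zero => simp [fLoop]
  | succ m ih =>
    have h1 : ((m + 1 : Nat) : Int) ≠ 0 := by positivity
    have h2 : ((m + 1 : Nat) : Int) - 1 = (m : Int) := by push_cast; ring
    rw [fLoop, if_neg h1, h2, ih, Finset.sum_range_succ]
    push_cast; ring

-- Hockey stick: ∑_{j<M} C(j, k) = C(M, k+1).
theorem sum_choose_eq (M k : Nat) :
    ∑ j ∈ Finset.range M, (j.choose k : Int) = (M.choose (k + 1) : Int) := by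
  induction M with
  | zero => simp
  | succ m ih => rw [Finset.sum_range_succ, ih, Nat.choose_succ_succ]; push_cast; ring

-- A computes the binomial coefficient.
theorem fAux_eq (k : Nat) : ∀ N : Int, 1 ≤ N → fAux k N = ((N - 1).toNat.choose k : Int) := by
  induction k with
  | zero => intro N _; simp [fAux]
  | succ m ih =>
    intro N hN
    rw [fAux]
    obtain ⟨M, hM⟩ : ∃ M : Nat, (M : Int) = N - 1 := ⟨(N - 1).toNat, by omega⟩
    have hMt : (N - 1).toNat = M := by omega
    rw [hMt, ← hM, fLoop_eq, zero_add]
    rw [← sum_choose_eq M m]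
    apply Finset.sum_congr rfl
    intro j hj
    rw [ih ((j : Int) + 1) (by omega)]
    norm_num

-- One step of B's product loop preserves the binomial invariant.
theorem step_choose (m i : Nat) :
    PySem.Int.floordiv ((m.choose i : Int) * ((m : Int) - i) ) ((i : Int) + 1)
      = (m.choose (i + 1) : Int) := by
  by_cases him : i + 1 ≤ m
  · have hkey : (m.choose i : Int) * ((m : Int) - i) = (m.choose (i + 1) : Int) * ((i : Int) + 1) := by
      have h := Nat.choose_succ_right_eq m i
      have hsub : ((m - i : Nat) : Int) = (m : Int) - i := by omega
      calc (m.choose i : Int) * ((m : Int) - i)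
          = ((m.choose i * (m - i) : Nat) : Int) := by push_cast [hsub]; ring
        _ = ((m.choose (i + 1) * (i + 1) : Nat) : Int) := by rw [← h]
        _ = (m.choose (i + 1) : Int) * ((i : Int) + 1) := by push_cast; ring
    rw [hkey, PySem.Int.floordiv_eq_ediv_of_pos (by positivity)]
    exact Int.mul_ediv_cancel _ (by positivity)
  · have h1 : m.choose (i + 1) = 0 := Nat.choose_eq_zero_of_lt (by omega)
    by_cases hmi : m = i
    · subst hmi; simp [PySem.Int.floordiv]
    · have h0 : m.choose i = 0 := Nat.choose_eq_zero_of_lt (by omega)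
      simp [h0, h1, PySem.Int.floordiv]

-- B's fold from i = a onward, starting from C(m, a), ends at C(m, a + len).
theorem fold_choose (m : Nat) (len : Nat) : ∀ a : Nat,
    (PySem.List.pyRange (a : Int) ((a : Int) + len) 1).foldl
        (fun r i => PySem.Int.floordiv (r * ((m : Int) - i)) (i + 1)) (m.choose a : Int)
      = (m.choose (a + len) : Int) := by
  induction len with
  | zero => intro a; simp [PySem.List.pyRange_one_eq_nil (le_refl (a : Int))]
  | succ l ih =>
    intro a
    have hlt : (a : Int) < (a : Int) + (l + 1 : Nat) := by push_cast; omega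
    rw [PySem.List.pyRange_one_cons hlt, List.foldl_cons]
    have hshift : (a : Int) + ((l + 1 : Nat) : Int) = ((a + 1 : Nat) : Int) + (l : Nat) := by
      push_cast; ring
    have hcast : ((a : Int) + 1) = ((a + 1 : Nat) : Int) := by push_cast; ring
    have hstep : PySem.Int.floordiv ((m.choose a : Int) * ((m : Int) - a)) (((a + 1 : Nat) : Int))
        = (m.choose (a + 1) : Int) := by rw [← hcast]; exact step_choose m a
    rw [hcast, hshift, hstep, ih (a + 1), show a + 1 + l = a + (l + 1) from by omega]

-- B computes the binomial coefficient (for n > 0, N ≥ 1).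
theorem f_alt_eq (N n : Int) (hn : 0 < n) (hN : 1 ≤ N) :
    f_alt N n = (((N - 1).toNat).choose n.toNat : Int) := by
  unfold f_alt
  rw [if_neg (by omega)]
  by_cases hc : 0 ≤ N - 1 ∧ N - 1 < n
  · rw [if_pos hc, Nat.choose_eq_zero_of_lt (by omega : (N - 1).toNat < n.toNat)]
    simp
  rw [if_neg hc]
  have h := fold_choose (N - 1).toNat n.toNat 0
  simp only [Nat.cast_zero, zero_add, Nat.choose_zero_right, Nat.cast_one] at h
  rw [show ((n.toNat : Nat) : Int) = n from by omega,
      show (((N - 1).toNat : Nat) : Int) = N - 1 from by omega] at h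
  exact h

-- ===== VERDICT (by name: the statement is the Claim_ definition above) =====
theorem f_spec : Claim_equal_f := by
  intro N n _ hpre
  unfold Spec_f f
  rcases hpre with h0 | ⟨hn, hN, -⟩
  · subst h0; simp [f_alt]
  · rw [if_neg (by omega), if_pos hn, f_alt_eq N n hn hN]
    rcases Nat.eq_zero_or_pos n.toNat with h | h
    · omega
    · obtain ⟨k, hk⟩ := Nat.exists_eq_succ_of_ne_zero (Nat.pos_iff_ne_zero.mp h)
      rw [hk, fAux_eq (k+1) N hN]
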